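-- pv_equiv track=rewrite | github.com/anothermxxn/nestle-ai-chatbot | backend/src/graph/config.py | get_brand_category
-- ===== SOURCE A (Python) =====
-- BRAND_CATEGORIES = {
--     # Chocolate & Treats
--     "treat": ["AERO", "AFTER EIGHT", "BIG TURK", "COFFEE CRISP", "CRUNCH",
--               "DRUMSTICK BITES", "KIT KAT", "MACKINTOSH TOFFEE", "MIRAGE",
--               "QUALITY STREET", "ROLO", "SMARTIES", "TURTLES"],
--
--     # Coffee
--     "coffee": ["COFFEE-MATE", "NESCAFE"],
--
--     # Ice Cream & Frozen Treats
--     "frozen": ["DEL MONTE", "DRUMSTICK", "HAAGEN-DAZS", "PARLOUR", "REAL DAIRY"],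
--
--     # Infant Nutrition
--     "infant": ["MATERNA", "NIDO"],
--
--     # Meal Times Made Easy
--     "meal": ["MAGGI"],
--
--     # Nutrition +
--     "nutrition": ["BOOST", "BOOST KIDS", "IBGARD", "NATURE'S BOUNTY"],
--
--     # Pet Foods
--     "pet": ["PURINA"],
--
--     # Quick-Mix Drinks
--     "drink": ["CARNATION", "GOODHOST", "MILO", "NESTEA", "NESFRUTA", "NESQUIK"],
--
--     # Spring & Sparkling Water
--     "water": ["MAISON PERRIER", "PERRIER", "SAN PELLEGRINO"]
-- }
--
-- def get_brand_category(brand_name: str) -> str: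
--     """Get the category for a given brand name."""
--     if not brand_name:
--         return "unknown"
--
--     brand_upper = brand_name.upper()
--     for category, brands in BRAND_CATEGORIES.items():
--         if brand_upper in brands:
--             return category
--     return "other"
-- ===== SOURCE B (Python) =====
-- # Reverse index, keyed by LOWERCASE brand: one dict lookup per call, no loop.
-- LOWER_BRAND_TO_CATEGORY = {
--     "aero": "treat", "after eight": "treat", "big turk": "treat",
--     "coffee crisp": "treat", "crunch": "treat", "drumstick bites": "treat",
--     "kit kat": "treat", "mackintosh toffee": "treat", "mirage": "treat",
--     "quality street": "treat", "rolo": "treat", "smarties": "treat",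
--     "turtles": "treat",
--     "coffee-mate": "coffee", "nescafe": "coffee",
--     "del monte": "frozen", "drumstick": "frozen", "haagen-dazs": "frozen",
--     "parlour": "frozen", "real dairy": "frozen",
--     "materna": "infant", "nido": "infant",
--     "maggi": "meal",
--     "boost": "nutrition", "boost kids": "nutrition", "ibgard": "nutrition",
--     "nature's bounty": "nutrition",
--     "purina": "pet",
--     "carnation": "drink", "goodhost": "drink", "milo": "drink",
--     "nestea": "drink", "nesfruta": "drink", "nesquik": "drink",
--     "maison perrier": "water", "perrier": "water", "san pellegrino": "water",
-- }
--
-- def get_brand_category(brand_name: str) -> str: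
--     """Get the category for a given brand name."""
--     if not brand_name:
--         return "unknown"
--     return LOWER_BRAND_TO_CATEGORY.get(brand_name.lower(), "other")
-- ===== Notes on version B (the rewrite author's own statement) =====
-- stated objective: idiomatic
-- what changed: A's per-call loop over the category table with an inner membership scan is replaced by a flat reverse-index dict keyed by lowercased brand, so the function is a single dict lookup on brand_name.lower() with a default; correct because no brand occurs in two categories and upper/lower case-folding agree on ASCII.
import Mathlib
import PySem

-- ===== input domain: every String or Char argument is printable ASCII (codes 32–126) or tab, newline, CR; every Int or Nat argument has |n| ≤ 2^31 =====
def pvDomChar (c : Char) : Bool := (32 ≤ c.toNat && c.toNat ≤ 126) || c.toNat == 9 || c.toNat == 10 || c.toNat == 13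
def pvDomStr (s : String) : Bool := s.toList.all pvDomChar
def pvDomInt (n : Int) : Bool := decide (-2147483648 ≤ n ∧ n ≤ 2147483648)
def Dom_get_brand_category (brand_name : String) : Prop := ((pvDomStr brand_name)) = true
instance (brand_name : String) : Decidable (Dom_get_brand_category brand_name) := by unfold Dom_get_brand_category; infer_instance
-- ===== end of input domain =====

-- B replaces A's per-call loop over the category table (with an inner membership scan)
-- by a flat reverse-index dict keyed by LOWERCASED brand and a single lookup with default.

-- ===== PORT A =====
def BRAND_CATEGORIES : List (String × List String) :=
  [("treat", ["AERO", "AFTER EIGHT", "BIG TURK", "COFFEE CRISP", "CRUNCH",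
              "DRUMSTICK BITES", "KIT KAT", "MACKINTOSH TOFFEE", "MIRAGE",
              "QUALITY STREET", "ROLO", "SMARTIES", "TURTLES"]),
   ("coffee", ["COFFEE-MATE", "NESCAFE"]),
   ("frozen", ["DEL MONTE", "DRUMSTICK", "HAAGEN-DAZS", "PARLOUR", "REAL DAIRY"]),
   ("infant", ["MATERNA", "NIDO"]),
   ("meal", ["MAGGI"]),
   ("nutrition", ["BOOST", "BOOST KIDS", "IBGARD", "NATURE'S BOUNTY"]),
   ("pet", ["PURINA"]),
   ("drink", ["CARNATION", "GOODHOST", "MILO", "NESTEA", "NESFRUTA", "NESQUIK"]),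
   ("water", ["MAISON PERRIER", "PERRIER", "SAN PELLEGRINO"])]

-- the 'for category, brands in BRAND_CATEGORIES.items(): if brand_upper in brands: return category' loop
def categoryLoop (u : String) : List (String × List String) → String
  | [] => "other"
  | (category, brands) :: rest =>
      if brands.contains u then category else categoryLoop u rest

def get_brand_category (brand_name : String) : String :=
  if brand_name = "" then "unknown"
  else categoryLoop (PySem.Str.upper brand_name) BRAND_CATEGORIES

-- ===== PORT B =====
-- the literal dict LOWER_BRAND_TO_CATEGORY from Source B (keys are lowercase brands)
def LOWER_BRAND_TO_CATEGORY : PySem.Dict String String :=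
  PySem.Dict.mk
  [("aero", "treat"), ("after eight", "treat"), ("big turk", "treat"),
   ("coffee crisp", "treat"), ("crunch", "treat"), ("drumstick bites", "treat"),
   ("kit kat", "treat"), ("mackintosh toffee", "treat"), ("mirage", "treat"),
   ("quality street", "treat"), ("rolo", "treat"), ("smarties", "treat"),
   ("turtles", "treat"),
   ("coffee-mate", "coffee"), ("nescafe", "coffee"),
   ("del monte", "frozen"), ("drumstick", "frozen"), ("haagen-dazs", "frozen"),
   ("parlour", "frozen"), ("real dairy", "frozen"),
   ("materna", "infant"), ("nido", "infant"),
   ("maggi", "meal"),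
   ("boost", "nutrition"), ("boost kids", "nutrition"), ("ibgard", "nutrition"),
   ("nature's bounty", "nutrition"),
   ("purina", "pet"),
   ("carnation", "drink"), ("goodhost", "drink"), ("milo", "drink"),
   ("nestea", "drink"), ("nesfruta", "drink"), ("nesquik", "drink"),
   ("maison perrier", "water"), ("perrier", "water"), ("san pellegrino", "water")]

def get_brand_category_alt (brand_name : String) : String :=
  if brand_name = "" then "unknown"
  else LOWER_BRAND_TO_CATEGORY.getD (PySem.Str.lower brand_name) "other"

-- ===== PRECONDITION & SPEC =====
def Spec_get_brand_category (brand_name : String) (out : String) : Prop := out = get_brand_category_alt brand_name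
instance (brand_name : String) (out : String) : Decidable (Spec_get_brand_category brand_name out) := by unfold Spec_get_brand_category; infer_instance

-- ===== CLAIM (what is proved, stated in full; the proofs are below) =====
def Claim_equal_get_brand_category : Prop := ∀ (brand_name : String), Dom_get_brand_category brand_name → Spec_get_brand_category brand_name (get_brand_category brand_name)

-- ===== LEMMAS AND PROOFS =====

theorem char_le_iff_toNat (a b : Char) : a ≤ b ↔ a.toNat ≤ b.toNat := by
  rw [Char.le_def, UInt32.le_iff_toNat_le]; rfl

-- case-folding is idempotent across the two maps, on EVERY Char (PySem's upper/lower are ASCII-only)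
theorem lower_upper_char (c : Char) :
    PySem.Chars.lowerChar (PySem.Chars.upperChar c) = PySem.Chars.lowerChar c := by
  have ha : ('a' : Char).toNat = 97 := rfl
  have hz : ('z' : Char).toNat = 122 := rfl
  have hA : ('A' : Char).toNat = 65 := rfl
  have hZ : ('Z' : Char).toNat = 90 := rfl
  simp only [PySem.Chars.lowerChar, PySem.Chars.upperChar, PySem.Chars.isupper,
    PySem.Chars.islower, decide_eq_true_eq, Bool.and_eq_true, char_le_iff_toNat,
    ha, hz, hA, hZ]
  by_cases hl : 97 ≤ c.toNat ∧ c.toNat ≤ 122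
  · have hval : (c.toNat - 32).isValidChar := by constructor; omega
    have htn : (Char.ofNat (c.toNat - 32)).toNat = c.toNat - 32 := by
      rw [Char.toNat_ofNat, if_pos hval]
    rw [if_pos hl, if_pos (by rw [htn]; omega), if_neg (by omega), htn]
    have h32 : c.toNat - 32 + 32 = c.toNat := by omega
    rw [h32, Char.ofNat_toNat]
  · rw [if_neg hl]

theorem upper_lower_char (c : Char) :
    PySem.Chars.upperChar (PySem.Chars.lowerChar c) = PySem.Chars.upperChar c := by
  have ha : ('a' : Char).toNat = 97 := rfl
  have hz : ('z' : Char).toNat = 122 := rfl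
  have hA : ('A' : Char).toNat = 65 := rfl
  have hZ : ('Z' : Char).toNat = 90 := rfl
  simp only [PySem.Chars.lowerChar, PySem.Chars.upperChar, PySem.Chars.isupper,
    PySem.Chars.islower, decide_eq_true_eq, Bool.and_eq_true, char_le_iff_toNat,
    ha, hz, hA, hZ]
  by_cases hu : 65 ≤ c.toNat ∧ c.toNat ≤ 90
  · have hval : (c.toNat + 32).isValidChar := by constructor; omega
    have htn : (Char.ofNat (c.toNat + 32)).toNat = c.toNat + 32 := by
      rw [Char.toNat_ofNat, if_pos hval]
    rw [if_pos hu, if_pos (by rw [htn]; omega), if_neg (by omega), htn]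
    have h32 : c.toNat + 32 - 32 = c.toNat := by omega
    rw [h32, Char.ofNat_toNat]
  · rw [if_neg hu]

theorem lower_upper_str (s : String) :
    PySem.Str.lower (PySem.Str.upper s) = PySem.Str.lower s := by
  simp only [PySem.Str.lower, PySem.Str.upper, PySem.Chars.lower, PySem.Chars.upper,
    String.toList_ofList, List.map_map]
  congr 1
  exact List.map_congr_left (fun c _ => lower_upper_char c)

theorem upper_lower_str (s : String) :
    PySem.Str.upper (PySem.Str.lower s) = PySem.Str.upper s := by
  simp only [PySem.Str.lower, PySem.Str.upper, PySem.Chars.lower, PySem.Chars.upper,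
    String.toList_ofList, List.map_map]
  congr 1
  exact List.map_congr_left (fun c _ => upper_lower_char c)

-- for an uppercase-fixed literal U: matching on upper s equals matching lower s on lower U
theorem upper_eq_iff_lower_eq (s U : String) (hU : PySem.Str.upper U = U) :
    PySem.Str.upper s = U ↔ PySem.Str.lower s = PySem.Str.lower U := by
  constructor
  · intro h; rw [← h, lower_upper_str]
  · intro h
    have := congrArg PySem.Str.upper h
    rwa [upper_lower_str, upper_lower_str, hU] at this

def flatLower (t : List (String × List String)) : List (String × String) :=
  t.flatMap (fun p => p.2.map (fun brand => (PySem.Str.lower brand, p.1)))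

-- B's literal dict is the lowercased flat index of A's table
set_option maxRecDepth 10000 in
theorem lower_dict_eq_mk :
    LOWER_BRAND_TO_CATEGORY = PySem.Dict.mk (flatLower BRAND_CATEGORIES) := by
  decide

theorem get?_mk_lowered_append (s c : String) (bs : List String)
    (hbs : ∀ b ∈ bs, PySem.Str.upper b = b) (rest : List (String × String)) :
    (PySem.Dict.mk (bs.map (fun b => (PySem.Str.lower b, c)) ++ rest)).get? (PySem.Str.lower s)
      = if bs.contains (PySem.Str.upper s) then some c
        else (PySem.Dict.mk rest).get? (PySem.Str.lower s) := by
  induction bs with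
  | nil => simp
  | cons b bs ih =>
      have hb := hbs b (List.mem_cons_self ..)
      simp only [List.map_cons, List.cons_append, PySem.Dict.get?_mk_cons,
        ih (fun x hx => hbs x (List.mem_cons_of_mem _ hx)), List.contains_cons]
      by_cases h : PySem.Str.upper s = b
      · have : PySem.Str.lower b = PySem.Str.lower s :=
          ((upper_eq_iff_lower_eq s b hb).mp h).symm
        simp [this, h]
      · have : PySem.Str.lower b ≠ PySem.Str.lower s := by
          intro hc
          exact h ((upper_eq_iff_lower_eq s b hb).mpr hc.symm)
        have hbe : (PySem.Str.upper s == b) = false := by simp [h]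
        simp [this, hbe]

theorem categoryLoop_eq_lookup (s : String) (t : List (String × List String))
    (ht : ∀ p ∈ t, ∀ b ∈ p.2, PySem.Str.upper b = b) :
    categoryLoop (PySem.Str.upper s) t
      = (PySem.Dict.mk (flatLower t)).getD (PySem.Str.lower s) "other" := by
  induction t with
  | nil => simp [categoryLoop, flatLower]; rfl
  | cons p rest ih =>
      obtain ⟨c, bs⟩ := p
      simp only [categoryLoop, flatLower, List.flatMap_cons]
      rw [PySem.Dict.getD_eq_get?_getD,
        get?_mk_lowered_append s c bs (ht (c, bs) (List.mem_cons_self ..)) _]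
      split_ifs with h
      · rfl
      · rw [ih (fun q hq => ht q (List.mem_cons_of_mem _ hq)),
          PySem.Dict.getD_eq_get?_getD]
        rfl

set_option maxRecDepth 10000 in
theorem table_upper_fixed :
    ∀ p ∈ BRAND_CATEGORIES, ∀ b ∈ p.2, PySem.Str.upper b = b := by
  decide

-- ===== VERDICT (by name: the statement is the Claim_ definition above) =====
theorem get_brand_category_spec : Claim_equal_get_brand_category := by
  intro brand_name _
  unfold Spec_get_brand_category get_brand_category get_brand_category_alt
  split_ifs with h
  · rfl
  · rw [lower_dict_eq_mk, categoryLoop_eq_lookup brand_name _ table_upper_fixed]
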